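-- pv_equiv track=rewrite | github.com/moonsong98/AlgorithmPractice | codetree/samsung/2023/2/1/1.py | check
-- ===== SOURCE A (Python) =====
-- def check(user_num, dir, users, damage, board, checked):
--     checked[user_num] = True
--
--     l = len(board) - 1
--     cur_y, cur_x, h, w, _ = users[user_num]
--
--     can_move = True
--
--     if dir == 0:
--         if cur_y == 1:
--             return False
--
--         for x in range(cur_x, cur_x + w):
--             if board[cur_y - 1][x] == -1:
--                 return False
--             if board[cur_y - 1][x] > 0 and not checked[board[cur_y - 1][x]]:
--                 can_move = can_move & check(board[cur_y - 1][x], dir, users, damage, board, checked)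
--
--     if dir == 1:
--         if cur_x + w - 1 == l:
--             return False
--
--         for y in range(cur_y, cur_y + h):
--             if board[y][cur_x + w] == -1:
--                 return False
--             if board[y][cur_x + w] > 0 and not checked[board[y][cur_x + w]]:
--                 can_move = can_move & check(board[y][cur_x + w], dir, users, damage, board, checked)
--
--     if dir == 2:
--         if cur_y + h - 1 == l:
--             return False
--
--         for x in range(cur_x, cur_x + w):
--             if board[cur_y + h][x] == -1:
--                 return False
--             if board[cur_y + h][x] > 0 and not checked[board[cur_y + h][x]]:
--                 can_move = can_move & check(board[cur_y + h][x], dir, users, damage, board, checked)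
--
--     if dir == 3:
--         if cur_x == 1:
--             return False
--
--         for y in range(cur_y, cur_y + h):
--             if board[y][cur_x - 1] == -1:
--                 return False
--             if board[y][cur_x - 1] > 0 and not checked[board[y][cur_x - 1]]:
--                 can_move = can_move & check(board[y][cur_x - 1], dir, users, damage, board, checked)
--
--     return can_move
-- ===== SOURCE B (Python) =====
-- # Iterative DFS with an explicit stack of scan frames instead of recursion.
-- # Like A, it mutates `checked` in place (it marks the same set of pieces).
-- def check(user_num, dir, users, damage, board, checked):
--     checked[user_num] = True
--     n = len(board)
--
--     def edge_cells(idx):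
--         # The boundary cells piece `idx` presses against in direction `dir`,
--         # in A's scan order; None means the piece already touches the wall.
--         cy, cx, h, w, _ = users[idx]
--         if dir == 0:
--             return None if cy == 1 else [(cy - 1, x) for x in range(cx, cx + w)]
--         if dir == 1:
--             return None if cx + w - 1 == n - 1 else [(y, cx + w) for y in range(cy, cy + h)]
--         if dir == 2:
--             return None if cy + h - 1 == n - 1 else [(cy + h, x) for x in range(cx, cx + w)]
--         if dir == 3:
--             return None if cx == 1 else [(y, cx - 1) for y in range(cy, cy + h)]
--         return []
--
--     first = edge_cells(user_num)
--     if first is None: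
--         return False
--     result = True
--     stack = [first]
--     while stack:
--         cells = stack.pop()
--         if not cells:
--             continue
--         (y, x), rest = cells[0], cells[1:]
--         v = board[y][x]
--         if v == -1:
--             # obstacle: this piece's scan is truncated, later frames continue
--             result = False
--             continue
--         stack.append(rest)
--         if v > 0 and not checked[v]:
--             checked[v] = True
--             c = edge_cells(v)
--             if c is None:
--                 result = False
--             else:
--                 stack.append(c)
--     return result
-- ===== Notes on version B (the rewrite author's own statement) =====
-- stated objective: alternative
-- what changed: Replaces A's recursive DFS (four copy-pasted per-direction loops, per-call can_move accumulation) by an iterative DFS over an explicit stack of edge-cell scan frames with one shared edge_cells helper and a single result flag.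
-- outside the precondition, e.g. on check(0, 0, [(2, 1, 1, 1, 0)], 0, [[0, 0], [0, 0]], [False]): A returns True, B returns True; on check(0, 3, [(1, 2, 1, 1, 0)], 0, [[0, 0], [0, 0]], [False]): A returns True, B returns True
import Mathlib
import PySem

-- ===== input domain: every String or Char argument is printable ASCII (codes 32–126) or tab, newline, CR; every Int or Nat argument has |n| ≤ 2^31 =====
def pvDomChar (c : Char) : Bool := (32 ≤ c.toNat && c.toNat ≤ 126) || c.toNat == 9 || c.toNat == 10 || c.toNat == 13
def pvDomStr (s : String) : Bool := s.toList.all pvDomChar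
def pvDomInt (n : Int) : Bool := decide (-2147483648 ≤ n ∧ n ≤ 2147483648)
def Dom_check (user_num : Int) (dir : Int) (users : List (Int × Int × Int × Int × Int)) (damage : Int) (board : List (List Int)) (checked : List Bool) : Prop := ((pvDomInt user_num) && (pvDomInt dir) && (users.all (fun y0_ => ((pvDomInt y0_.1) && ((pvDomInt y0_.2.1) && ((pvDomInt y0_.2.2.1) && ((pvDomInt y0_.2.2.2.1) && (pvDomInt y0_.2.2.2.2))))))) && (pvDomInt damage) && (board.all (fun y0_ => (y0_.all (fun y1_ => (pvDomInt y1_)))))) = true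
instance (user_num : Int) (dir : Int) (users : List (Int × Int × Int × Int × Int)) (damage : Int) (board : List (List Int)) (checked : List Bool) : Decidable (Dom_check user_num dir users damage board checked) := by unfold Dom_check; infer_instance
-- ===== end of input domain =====

-- B replaces A's recursive DFS by an iterative DFS over an explicit stack of edge-cell scan
-- frames (alternative decomposition, same cost); both Pythons mutate `checked` in place and
-- mark the same pieces — the theorems below are about the RETURN value.

-- ===== PORT A =====
-- board[y][x]; the .getD 0 default is only reached outside Pre_check (Python raises there)
def pvCell (board : List (List Int)) (y x : Int) : Int :=
  match PySem.List.pyGet? board y with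
  | none => 0
  | some row => (PySem.List.pyGet? row x).getD 0

mutual
-- fuel only makes the recursion total; under Pre_check the initial fuel is never exhausted
def checkA (fuel : Nat) (user_num : Int) (dir : Int) (users : List (Int × Int × Int × Int × Int)) (damage : Int) (board : List (List Int)) (checked : List Bool) : Bool × List Bool :=
  match fuel with
  | 0 => (false, checked)
  | fuel + 1 =>
    let checked1 := PySem.List.pySetD checked user_num true
    let l : Int := (board.length : Int) - 1
    match PySem.List.pyGet? users user_num with
    | none => (false, checked1)   -- IndexError in Python; outside Pre_check
    | some (cur_y, cur_x, h, w, _) =>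
      if dir == 0 then
        if cur_y == 1 then (false, checked1)
        else loopA fuel ((PySem.List.pyRange cur_x (cur_x + w) 1).map (fun x => (cur_y - 1, x))) dir users damage board true checked1
      else if dir == 1 then
        if cur_x + w - 1 == l then (false, checked1)
        else loopA fuel ((PySem.List.pyRange cur_y (cur_y + h) 1).map (fun y => (y, cur_x + w))) dir users damage board true checked1
      else if dir == 2 then
        if cur_y + h - 1 == l then (false, checked1)
        else loopA fuel ((PySem.List.pyRange cur_x (cur_x + w) 1).map (fun x => (cur_y + h, x))) dir users damage board true checked1
      else if dir == 3 then
        if cur_x == 1 then (false, checked1)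
        else loopA fuel ((PySem.List.pyRange cur_y (cur_y + h) 1).map (fun y => (y, cur_x - 1))) dir users damage board true checked1
      else (true, checked1)
termination_by (fuel, 0)

-- A's per-direction for-loop: early `return False` on a -1 cell, recursion into unchecked pieces
def loopA (fuel : Nat) (cells : List (Int × Int)) (dir : Int) (users : List (Int × Int × Int × Int × Int)) (damage : Int) (board : List (List Int)) (can_move : Bool) (checked : List Bool) : Bool × List Bool :=
  match cells with
  | [] => (can_move, checked)
  | (y, x) :: tl =>
    let v := pvCell board y x
    if v == -1 then (false, checked)
    else if (0 < v) && !((PySem.List.pyGet? checked v).getD false) then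
      match checkA fuel v dir users damage board checked with
      | (res, checked') => loopA fuel tl dir users damage board (can_move && res) checked'
    else loopA fuel tl dir users damage board can_move checked
termination_by (fuel, cells.length + 1)
end

def check (user_num : Int) (dir : Int) (users : List (Int × Int × Int × Int × Int)) (damage : Int) (board : List (List Int)) (checked : List Bool) : Bool :=
  (checkA (checked.length + 1) user_num dir users damage board checked).1

-- ===== PORT B =====
-- edge_cells of Source B: none = the piece already touches the wall in direction dir
def cellsB (idx : Int) (dir : Int) (users : List (Int × Int × Int × Int × Int)) (board : List (List Int)) : Option (List (Int × Int)) :=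
  match PySem.List.pyGet? users idx with
  | none => some []   -- IndexError in Python; outside Pre_check
  | some (cy, cx, h, w, _) =>
    let n : Int := (board.length : Int)
    if dir == 0 then
      if cy == 1 then none else some ((PySem.List.pyRange cx (cx + w) 1).map (fun x => (cy - 1, x)))
    else if dir == 1 then
      if cx + w - 1 == n - 1 then none else some ((PySem.List.pyRange cy (cy + h) 1).map (fun y => (y, cx + w)))
    else if dir == 2 then
      if cy + h - 1 == n - 1 then none else some ((PySem.List.pyRange cx (cx + w) 1).map (fun x => (cy + h, x)))
    else if dir == 3 then
      if cx == 1 then none else some ((PySem.List.pyRange cy (cy + h) 1).map (fun y => (y, cx - 1)))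
    else some []

def pvStackCells (stack : List (List (Int × Int))) : Nat :=
  (stack.map List.length).sum

-- setting a `false` entry to `true` strictly lowers the number of `false`s (runB's termination)
theorem pvCountFalse_set_le (xs : List Bool) (i : Nat) :
    (xs.set i true).count false ≤ xs.count false := by
  induction xs generalizing i with
  | nil => simp
  | cons a tl ih =>
    cases i with
    | zero => cases a <;> simp
    | succ n => cases a <;> simp <;> exact ih n

theorem pvCountFalse_set_lt (xs : List Bool) (i : Nat) (h : i < xs.length)
    (hf : xs.getD i false = false) : (xs.set i true).count false < xs.count false := by
  induction xs generalizing i with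
  | nil => simp at h
  | cons a tl ih =>
    cases i with
    | zero =>
      simp at hf; subst hf
      have := pvCountFalse_set_le tl 0
      simp
    | succ n =>
      simp at h hf
      have := ih n h hf
      cases a <;> simp <;> omega

theorem pvMark_count_lt (checked : List Bool) (v : Int)
    (h : (decide (0 < v) && decide (v < (checked.length : Int)) && !checked.getD v.toNat false) = true) :
    (PySem.List.pySetD checked v true).count false < checked.count false := by
  simp only [Bool.and_eq_true, decide_eq_true_eq, Bool.not_eq_true'] at h
  obtain ⟨⟨h1, h2⟩, h3⟩ := h
  rw [PySem.List.pySetD_of_nonneg _ _ (le_of_lt h1)]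
  exact pvCountFalse_set_lt checked v.toNat (by omega) h3

-- Source B's while loop over the explicit stack of scan frames (in-range test added only to
-- make the recursion well-founded; inside Pre_check every positive cell value is in range)
def runB (dir : Int) (users : List (Int × Int × Int × Int × Int)) (damage : Int) (board : List (List Int)) (stack : List (List (Int × Int))) (result : Bool) (checked : List Bool) : Bool :=
  match stack with
  | [] => result
  | cells :: S =>
    match cells with
    | [] => runB dir users damage board S result checked
    | (y, x) :: rest =>
      let v := pvCell board y x
      if v == -1 then runB dir users damage board S false checked
      else if (0 < v) && (v < (checked.length : Int)) && !(checked.getD v.toNat false) then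
        let checked' := PySem.List.pySetD checked v true
        match cellsB v dir users board with
        | none => runB dir users damage board (rest :: S) false checked'
        | some c => runB dir users damage board (c :: rest :: S) result checked'
      else runB dir users damage board (rest :: S) result checked
termination_by (checked.count false, pvStackCells stack, stack.length)
decreasing_by
  all_goals simp only [pvStackCells, List.map_cons, List.sum_cons, List.length_cons, List.length_nil, Nat.zero_add]
  · exact Prod.Lex.right _ (Prod.Lex.right _ (by omega))
  · exact Prod.Lex.right _ (Prod.Lex.left _ _ (by omega))
  · exact Prod.Lex.left _ _ (pvMark_count_lt _ _ (by assumption))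
  · exact Prod.Lex.left _ _ (pvMark_count_lt _ _ (by assumption))
  · exact Prod.Lex.right _ (Prod.Lex.left _ _ (by omega))

def check_alt (user_num : Int) (dir : Int) (users : List (Int × Int × Int × Int × Int)) (damage : Int) (board : List (List Int)) (checked : List Bool) : Bool :=
  let checked1 := PySem.List.pySetD checked user_num true
  match cellsB user_num dir users board with
  | none => false
  | some c => runB dir users damage board [c] true checked1

-- ===== PRECONDITION & SPEC =====
-- Pre_check = the wrap-valid piece index plus one of: an invalid direction, a piece that scans
-- nothing (wall-adjacent or empty extent), or the puzzle's fully well-formed domain (square board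
-- whose cells are -1 or piece indices below len(users) <= len(checked), geometrically in-bounds
-- pieces).  Outside it A's deeper scans may raise IndexError; A can also RETURN on some inputs
-- whose scan happens to stay in (possibly negatively wrapped) range — those few are excluded
-- because a closed-form precondition cannot name the set of scanned cells (see the cited examples).
def Pre_check (user_num : Int) (dir : Int) (users : List (Int × Int × Int × Int × Int)) (damage : Int) (board : List (List Int)) (checked : List Bool) : Prop :=
  (-(users.length : Int) ≤ user_num ∧ user_num < (users.length : Int) ∧
   -(checked.length : Int) ≤ user_num ∧ user_num < (checked.length : Int)) ∧
  ((dir ≠ 0 ∧ dir ≠ 1 ∧ dir ≠ 2 ∧ dir ≠ 3) ∨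
   ((PySem.List.pyGet? users user_num).any (fun u =>
      (dir == 0 && u.1 == 1) ||
      (dir == 1 && u.2.1 + u.2.2.2.1 - 1 == (board.length : Int) - 1) ||
      (dir == 2 && u.1 + u.2.2.1 - 1 == (board.length : Int) - 1) ||
      (dir == 3 && u.2.1 == 1) ||
      ((dir == 0 || dir == 2) && decide (u.2.2.2.1 ≤ 0)) ||
      ((dir == 1 || dir == 3) && decide (u.2.2.1 ≤ 0))) = true) ∨
   (0 ≤ user_num ∧ user_num < (users.length : Int) ∧ users.length ≤ checked.length ∧
    (∀ row ∈ board, row.length = board.length) ∧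
    (∀ row ∈ board, ∀ v ∈ row, -1 ≤ v ∧ v < (users.length : Int)) ∧
    (∀ u ∈ users, 1 ≤ u.1 ∧ 1 ≤ u.2.1 ∧ 1 ≤ u.2.2.1 ∧ 1 ≤ u.2.2.2.1 ∧
      u.1 + u.2.2.1 ≤ (board.length : Int) ∧ u.2.1 + u.2.2.2.1 ≤ (board.length : Int))))
instance (user_num : Int) (dir : Int) (users : List (Int × Int × Int × Int × Int)) (damage : Int) (board : List (List Int)) (checked : List Bool) : Decidable (Pre_check user_num dir users damage board checked) := by unfold Pre_check; infer_instance

def pvWitness_check : Int × Int × (List (Int × Int × Int × Int × Int)) × Int × List (List Int) × List Bool :=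
  (0, 0, [(1, 1, 1, 1, 0)], 0, [[0, 0], [0, 0]], [false])

def Spec_check (user_num : Int) (dir : Int) (users : List (Int × Int × Int × Int × Int)) (damage : Int) (board : List (List Int)) (checked : List Bool) (out : Bool) : Prop := out = check_alt user_num dir users damage board checked
instance (user_num : Int) (dir : Int) (users : List (Int × Int × Int × Int × Int)) (damage : Int) (board : List (List Int)) (checked : List Bool) (out : Bool) : Decidable (Spec_check user_num dir users damage board checked out) := by unfold Spec_check; infer_instance

-- ===== CLAIM (what is proved, stated in full; the proofs are below) =====
def Claim_equal_check : Prop := ∀ (user_num : Int) (dir : Int) (users : List (Int × Int × Int × Int × Int)) (damage : Int) (board : List (List Int)) (checked : List Bool), Dom_check user_num dir users damage board checked → Pre_check user_num dir users damage board checked → Spec_check user_num dir users damage board checked (check user_num dir users damage board checked)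

-- ===== LEMMAS AND PROOFS =====

-- marking any index never increases the number of `false`s
theorem pvCountFalse_pySetD_le (xs : List Bool) (i : Int) :
    (PySem.List.pySetD xs i true).count false ≤ xs.count false := by
  simp only [PySem.List.pySetD, PySem.List.pySet?]
  cases PySem.List.pyIdx? xs.length i with
  | none => simp
  | some k => simpa using pvCountFalse_set_le xs k

theorem pvLen_pySetD (xs : List Bool) (i : Int) (v : Bool) :
    (PySem.List.pySetD xs i v).length = xs.length := by
  simp only [PySem.List.pySetD, PySem.List.pySet?]
  cases PySem.List.pyIdx? xs.length i with
  | none => simp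
  | some k => simp

-- a positive cell value really is an entry of some row of the board
theorem pvCell_mem (board : List (List Int)) (y x : Int) (h : pvCell board y x ≠ 0) :
    ∃ row ∈ board, pvCell board y x ∈ row := by
  unfold pvCell at *
  cases hr : PySem.List.pyGet? board y with
  | none => simp [hr] at h
  | some row =>
    refine ⟨row, PySem.List.mem_of_pyGet?_eq_some _ hr, ?_⟩
    cases hc : PySem.List.pyGet? row x with
    | none => simp [hr, hc] at h
    | some u => simp [hc]; exact PySem.List.mem_of_pyGet?_eq_some _ hc

-- A's membership test, written the way B reads `checked`
theorem pvGuard_eq (checked : List Bool) (v : Int) (h0 : 0 ≤ v) :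
    (PySem.List.pyGet? checked v).getD false = checked.getD v.toNat false := by
  rw [PySem.List.pyGet?_of_nonneg _ h0, List.getD_eq_getElem?_getD]

-- length / count-false preservation for A's mutual recursion
theorem loopA_pres (n : Nat)
    (hc : ∀ (un dir : Int) (users : List (Int × Int × Int × Int × Int)) (damage : Int)
        (board : List (List Int)) (checked : List Bool),
        (checkA n un dir users damage board checked).2.length = checked.length ∧
        (checkA n un dir users damage board checked).2.count false ≤ checked.count false)
    (cells : List (Int × Int)) (dir : Int) (users : List (Int × Int × Int × Int × Int))
    (damage : Int) (board : List (List Int)) (m : Bool) (checked : List Bool) :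
    (loopA n cells dir users damage board m checked).2.length = checked.length ∧
    (loopA n cells dir users damage board m checked).2.count false ≤ checked.count false := by
  induction cells generalizing m checked with
  | nil => simp [loopA]
  | cons c tl ih =>
    obtain ⟨y, x⟩ := c
    simp only [loopA]
    by_cases hw : pvCell board y x == -1
    · simp [hw]
    · simp only [hw, Bool.false_eq_true]
      by_cases hg : ((decide (0 < pvCell board y x)) && !((PySem.List.pyGet? checked (pvCell board y x)).getD false)) = true
      · simp only [hg, if_true]
        rcases hA : checkA n (pvCell board y x) dir users damage board checked with ⟨res, ch2⟩
        have h1 := hc (pvCell board y x) dir users damage board checked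
        rw [hA] at h1
        have h2 := ih (m && res) ch2
        exact ⟨h2.1.trans h1.1, h2.2.trans h1.2⟩
      · simp only [hg, if_false]
        exact ih m checked

theorem checkA_pres (n : Nat) :
    ∀ (un dir : Int) (users : List (Int × Int × Int × Int × Int)) (damage : Int)
      (board : List (List Int)) (checked : List Bool),
      (checkA n un dir users damage board checked).2.length = checked.length ∧
      (checkA n un dir users damage board checked).2.count false ≤ checked.count false := by
  induction n with
  | zero => intro un dir users damage board checked; simp [checkA]
  | succ n ih =>
    intro un dir users damage board checked
    have hmark : (PySem.List.pySetD checked un true).length = checked.length ∧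
        (PySem.List.pySetD checked un true).count false ≤ checked.count false :=
      ⟨pvLen_pySetD _ _ _, pvCountFalse_pySetD_le _ _⟩
    have key : ∀ cells, (loopA n cells dir users damage board true (PySem.List.pySetD checked un true)).2.length = checked.length ∧
        (loopA n cells dir users damage board true (PySem.List.pySetD checked un true)).2.count false ≤ checked.count false := by
      intro cells
      have h := loopA_pres n ih cells dir users damage board true (PySem.List.pySetD checked un true)
      exact ⟨h.1.trans hmark.1, h.2.trans hmark.2⟩
    simp only [checkA]
    cases hu : PySem.List.pyGet? users un with
    | none => simpa using hmark
    | some u =>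
      obtain ⟨cy, cx, h, w, e⟩ := u
      dsimp only
      split_ifs <;> first
        | simpa using hmark
        | (exact key _)

-- A's running flag `can_move` factors out of the loop
theorem loopA_and (n : Nat) (cells : List (Int × Int)) (dir : Int)
    (users : List (Int × Int × Int × Int × Int)) (damage : Int) (board : List (List Int))
    (m : Bool) (checked : List Bool) :
    loopA n cells dir users damage board m checked =
      ((m && (loopA n cells dir users damage board true checked).1),
       (loopA n cells dir users damage board true checked).2) := by
  induction cells generalizing m checked with
  | nil => simp [loopA]
  | cons c tl ih =>
    obtain ⟨y, x⟩ := c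
    simp only [loopA]
    by_cases hw : pvCell board y x == -1
    · simp [hw]
    · simp only [hw, Bool.false_eq_true]
      by_cases hg : ((decide (0 < pvCell board y x)) && !((PySem.List.pyGet? checked (pvCell board y x)).getD false)) = true
      · simp only [hg, if_true]
        rcases hA : checkA n (pvCell board y x) dir users damage board checked with ⟨res, ch2⟩
        rw [ih (m && res) ch2, ih (true && res) ch2]
        simp [Bool.and_assoc]
      · simp only [hg, if_false]
        rw [ih m checked, ih true checked]
        simp

-- unfolding checkA through B's edge_cells helper (the two ports compute the same scan frame)
theorem cellsB_spec (n : Nat) (v dir : Int) (users : List (Int × Int × Int × Int × Int))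
    (damage : Int) (board : List (List Int)) (checked : List Bool)
    (u : Int × Int × Int × Int × Int) (hu : PySem.List.pyGet? users v = some u) :
    checkA (n + 1) v dir users damage board checked =
      (match cellsB v dir users board with
       | none => (false, PySem.List.pySetD checked v true)
       | some c => loopA n c dir users damage board true (PySem.List.pySetD checked v true)) := by
  obtain ⟨cy, cx, h, w, e⟩ := u
  simp only [checkA, cellsB, hu]
  by_cases h0 : dir = 0
  · by_cases hb : cy = 1 <;> simp [h0, hb]
  · by_cases h1 : dir = 1
    · by_cases hb : cx + w - 1 = (board.length : Int) - 1 <;> simp [h1, hb]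
    · by_cases h2 : dir = 2
      · by_cases hb : cy + h - 1 = (board.length : Int) - 1 <;> simp [h2, hb]
      · by_cases h3 : dir = 3
        · by_cases hb : cx = 1 <;> simp [h3, hb]
        · simp [h0, h1, h2, h3, loopA]

-- MAIN SIMULATION: running B's stack machine on one frame is running A's loop on it
theorem simB (n : Nat) :
    ∀ (cells : List (Int × Int)) (S : List (List (Int × Int))) (r : Bool) (checked : List Bool)
      (dir : Int) (users : List (Int × Int × Int × Int × Int)) (damage : Int) (board : List (List Int)),
      (∀ row ∈ board, ∀ u ∈ row, 0 < u → u < (users.length : Int)) →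
      users.length ≤ checked.length →
      checked.count false < n →
      runB dir users damage board (cells :: S) r checked
        = runB dir users damage board S
            (r && (loopA n cells dir users damage board true checked).1)
            (loopA n cells dir users damage board true checked).2 := by
  induction n with
  | zero => intro _ _ _ _ _ _ _ _ _ _ hf; exact absurd hf (Nat.not_lt_zero _)
  | succ n ihn =>
    intro cells
    induction cells with
    | nil =>
      intro S r checked dir users damage board hub hlen hf
      simp [runB, loopA]
    | cons c tl ih =>
      intro S r checked dir users damage board hub hlen hf
      obtain ⟨y, x⟩ := c
      by_cases hw : pvCell board y x = -1
      · simp [runB, loopA, hw]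
      · by_cases hpos : 0 < pvCell board y x
        · have hmem := pvCell_mem board y x (by omega)
          obtain ⟨row, hrow, hv⟩ := hmem
          have hvu : pvCell board y x < (users.length : Int) := hub row hrow _ hv hpos
          have hvc : pvCell board y x < (checked.length : Int) := by
            have := hlen; omega
          by_cases hch : checked.getD (pvCell board y x).toNat false = true
          · -- already checked: both sides skip the cell
            have hgB : ((decide (0 < pvCell board y x)) && (decide (pvCell board y x < (checked.length : Int))) && !(checked.getD (pvCell board y x).toNat false)) = false := by
              simp only [hch, Bool.not_true, Bool.and_false]
            have hgA : ((decide (0 < pvCell board y x)) && !((PySem.List.pyGet? checked (pvCell board y x)).getD false)) = false := by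
              rw [pvGuard_eq checked _ (le_of_lt hpos)]
              simp only [hch, Bool.not_true, Bool.and_false]
            simp only [runB, loopA, hgA, hgB]
            simp only [beq_iff_eq, hw, if_false]
            exact ih S r checked dir users damage board hub hlen hf
          · -- unchecked piece: B pushes its frame, A recurses into it
            have hch' : checked.getD (pvCell board y x).toNat false = false := by
              cases hq : checked.getD (pvCell board y x).toNat false
              · rfl
              · exact absurd hq hch
            have hgB : ((decide (0 < pvCell board y x)) && (decide (pvCell board y x < (checked.length : Int))) && !(checked.getD (pvCell board y x).toNat false)) = true := by
              simp only [hch', Bool.not_false, Bool.and_true]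
              simp [hpos, hvc]
            have hgA : ((decide (0 < pvCell board y x)) && !((PySem.List.pyGet? checked (pvCell board y x)).getD false)) = true := by
              rw [pvGuard_eq checked _ (le_of_lt hpos)]
              simp only [hch', Bool.not_false, Bool.and_true]
              simp [hpos]
            have hu : PySem.List.pyGet? users (pvCell board y x) = some (users[(pvCell board y x).toNat]) :=
              PySem.List.pyGet?_eq_some_getElem _ (le_of_lt hpos) hvu
            have hmarklt : (PySem.List.pySetD checked (pvCell board y x) true).count false < checked.count false :=
              pvMark_count_lt checked _ (by
                simp only [hch', Bool.not_false, Bool.and_true]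
                simp [hpos, hvc])
            have hmarklen : (PySem.List.pySetD checked (pvCell board y x) true).length = checked.length :=
              pvLen_pySetD _ _ _
            have hCB := cellsB_spec n (pvCell board y x) dir users damage board checked _ hu
            cases hcb : cellsB (pvCell board y x) dir users board with
            | none =>
              -- boundary: B records False and continues with the rest of the frame
              rw [hcb] at hCB
              simp only [runB, loopA, hw, hgA, hgB, hcb, hCB, beq_iff_eq, if_false, if_true]
              rw [ih (S := S) (r := false) (checked := PySem.List.pySetD checked (pvCell board y x) true) dir users damage board hub
                (by rw [hmarklen]; exact hlen) (Nat.lt_of_lt_of_le hmarklt (Nat.le_of_lt hf))]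
              rw [loopA_and (n + 1) tl dir users damage board (true && false)]
              simp
            | some c =>
              rw [hcb] at hCB
              simp only [runB, loopA, hw, hgA, hgB, hcb, hCB, beq_iff_eq, if_false, if_true]
              rcases hL : loopA n c dir users damage board true (PySem.List.pySetD checked (pvCell board y x) true) with ⟨res, ch2⟩
              have hpres := loopA_pres n (checkA_pres n) c dir users damage board true (PySem.List.pySetD checked (pvCell board y x) true)
              rw [hL] at hpres
              rw [ihn c (tl :: S) r (PySem.List.pySetD checked (pvCell board y x) true) dir users damage board hub
                (by rw [hmarklen]; exact hlen) (by omega)]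
              rw [hL]
              rw [ih (S := S) (r := r && res) (checked := ch2) dir users damage board hub
                (by rw [hpres.1, hmarklen]; exact hlen)
                (Nat.lt_of_le_of_lt hpres.2 (Nat.lt_of_lt_of_le hmarklt (Nat.le_of_lt hf)))]
              rw [loopA_and (n+1) tl dir users damage board (true && res)]
              simp [Bool.and_assoc]
        · -- not a piece (0 or junk): both sides skip
          have hgB : ((decide (0 < pvCell board y x)) && (decide (pvCell board y x < (checked.length : Int))) && !(checked.getD (pvCell board y x).toNat false)) = false := by
            simp [hpos]
          have hgA : ((decide (0 < pvCell board y x)) && !((PySem.List.pyGet? checked (pvCell board y x)).getD false)) = false := by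
            simp [hpos]
          simp only [runB, loopA, hw, hgA, hgB, beq_iff_eq, if_false, Bool.false_eq_true]
          exact ih S r checked dir users damage board hub hlen hf

-- `checked` after the top-level marking has strictly fewer `false`s than its length
theorem pvCountFalse_set_lt_len (xs : List Bool) (j : Nat) (h : j < xs.length) :
    (xs.set j true).count false < xs.length := by
  rcases Nat.lt_or_ge ((xs.set j true).count false) ((xs.set j true).length) with hlt | hge
  · simpa using hlt
  · exfalso
    have hle := List.count_le_length (l := xs.set j true) (a := false)
    have heq : (xs.set j true).count false = (xs.set j true).length := le_antisymm hle hge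
    have hall := (List.count_eq_length).mp heq
    have hj : j < (xs.set j true).length := by simpa using h
    have hm := List.getElem_mem hj
    rw [List.getElem_set_self] at hm
    have := hall true hm
    simp at this

-- ===== VERDICT (by name: the statement is the Claim_ definition above) =====
theorem check_spec : Claim_equal_check := by
  intro user_num dir users damage board checked hdom hpre
  obtain ⟨⟨hw1, hw2, hw3, hw4⟩, hcase⟩ := hpre
  obtain ⟨u, hu⟩ : ∃ u, PySem.List.pyGet? users user_num = some u := by
    cases h : PySem.List.pyGet? users user_num with
    | none =>
      exfalso
      exact (PySem.List.pyGet?_eq_none_iff users user_num).mp h ⟨hw1, hw2⟩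
    | some u => exact ⟨u, rfl⟩
  unfold Spec_check check check_alt
  rw [cellsB_spec checked.length user_num dir users damage board checked u hu]
  cases hcb : cellsB user_num dir users board with
  | none => rfl
  | some c =>
    dsimp only
    obtain ⟨uy, ux, uh, uw, ue⟩ := u
    rcases hcase with hinv | htriv | hnice
    · -- invalid direction: both ports scan nothing and return True
      obtain ⟨d0, d1, d2, d3⟩ := hinv
      rw [cellsB, hu] at hcb
      simp only [beq_iff_eq, d0, d1, d2, d3, if_false, Option.some.injEq] at hcb
      subst hcb
      simp [loopA, runB]
    · -- wall-adjacent piece or empty extent: the frame is empty (boundary gave `none` above)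
      rw [hu, Option.any_some] at htriv
      rw [cellsB, hu] at hcb
      have hc : c = [] := by
        by_cases h0 : dir = 0
        · simp only [h0, beq_iff_eq, beq_self_eq_true, Bool.true_and, if_true,
            Bool.and_eq_true, Bool.or_eq_true, decide_eq_true_eq] at htriv hcb
          rcases htriv with ((((hb | hb) | hb) | hb) | hb) | hb <;> simp_all
          all_goals
            (rw [PySem.List.pyRange_one_eq_nil (by omega)] at hcb; simpa using hcb.symm)
        · by_cases h1 : dir = 1
          · simp only [h1, beq_iff_eq, beq_self_eq_true, Bool.true_and, if_true,
              Bool.and_eq_true, Bool.or_eq_true, decide_eq_true_eq] at htriv hcb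
            rcases htriv with ((((hb | hb) | hb) | hb) | hb) | hb <;> simp_all
            all_goals
              (rw [PySem.List.pyRange_one_eq_nil (by omega)] at hcb; simpa using hcb.symm)
          · by_cases h2 : dir = 2
            · simp only [h2, beq_iff_eq, beq_self_eq_true, Bool.true_and, if_true,
                Bool.and_eq_true, Bool.or_eq_true, decide_eq_true_eq] at htriv hcb
              rcases htriv with ((((hb | hb) | hb) | hb) | hb) | hb <;> simp_all
              all_goals
                (rw [PySem.List.pyRange_one_eq_nil (by omega)] at hcb; simpa using hcb.symm)
            · by_cases h3 : dir = 3
              · simp only [h3, beq_iff_eq, beq_self_eq_true, Bool.true_and, if_true,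
                  Bool.and_eq_true, Bool.or_eq_true, decide_eq_true_eq] at htriv hcb
                rcases htriv with ((((hb | hb) | hb) | hb) | hb) | hb <;> simp_all
                all_goals
                  (rw [PySem.List.pyRange_one_eq_nil (by omega)] at hcb; simpa using hcb.symm)
              · simp only [beq_iff_eq, h0, h1, h2, h3, if_false, Option.some.injEq] at hcb
                exact hcb.symm
      subst hc
      simp [loopA, runB]
    · -- fully well-formed domain: run the stack-machine simulation
      obtain ⟨h0, h1, h2, hrows, hvals, hgeom⟩ := hnice
      have hj : user_num.toNat < checked.length := by omega
      have hub : ∀ row ∈ board, ∀ u ∈ row, 0 < u → u < (users.length : Int) := by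
        intro row hr u huu _; exact (hvals row hr u huu).2
      have hmlen : (PySem.List.pySetD checked user_num true).length = checked.length := pvLen_pySetD _ _ _
      have hmcnt : (PySem.List.pySetD checked user_num true).count false < checked.length := by
        rw [PySem.List.pySetD_of_nonneg _ _ h0]
        exact pvCountFalse_set_lt_len checked user_num.toNat hj
      rw [simB checked.length c [] true (PySem.List.pySetD checked user_num true) dir users damage board hub (by rw [hmlen]; exact h2) hmcnt]
      simp [runB]
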